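-- pv_equiv track=rewrite | github.com/pypi-data/pypi-mirror-395 | packages/mkdocstrings-luau/mkdocstrings_luau-0.1.1-py3-none-any.whl/mkdocstrings_handlers/luau/_internal/parser.py | _extract_function_docstring
-- ===== SOURCE A (Python) =====
-- def _extract_function_docstring(lines: list[str], func_lineno: int) -> str:
--     """Extract the docstring for a function from preceding comments.
--
--     Parameters:
--         lines: All lines in the file.
--         func_lineno: The line number where the function is defined (0-indexed).
--
--     Returns:
--         The function docstring.
--     """
--     docstring_lines: list[str] = []
--     # Look backwards from the function line
--     for i in range(func_lineno - 1, -1, -1):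
--         line = lines[i].strip()
--         if line.startswith("--"):
--             doc_line = line[2:].strip()
--             docstring_lines.insert(0, doc_line)
--         elif line:
--             # Stop at first non-comment, non-empty line
--             break
--
--     return "\n".join(docstring_lines)
-- ===== SOURCE B (Python) =====
-- def _extract_function_docstring(lines: list[str], func_lineno: int) -> str:
--     # Boundary-scan + forward extraction instead of one collecting backward loop.
--     i = func_lineno - 1
--     while i >= 0:
--         s = lines[i].strip()
--         if s and not s.startswith("--"):
--             break
--         i -= 1
--     out = []
--     for j in range(i + 1, func_lineno):
--         s = lines[j].strip()
--         if s.startswith("--"):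
--             out.append(s[2:].strip())
--     return "\n".join(out)
-- ===== Notes on version B (the rewrite author's own statement) =====
-- stated objective: alternative
-- what changed: A's single backward loop that collects comment text via insert(0) is replaced by a backward boundary-finding scan (no collecting) followed by a separate forward extraction pass that appends in order.
import Mathlib
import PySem

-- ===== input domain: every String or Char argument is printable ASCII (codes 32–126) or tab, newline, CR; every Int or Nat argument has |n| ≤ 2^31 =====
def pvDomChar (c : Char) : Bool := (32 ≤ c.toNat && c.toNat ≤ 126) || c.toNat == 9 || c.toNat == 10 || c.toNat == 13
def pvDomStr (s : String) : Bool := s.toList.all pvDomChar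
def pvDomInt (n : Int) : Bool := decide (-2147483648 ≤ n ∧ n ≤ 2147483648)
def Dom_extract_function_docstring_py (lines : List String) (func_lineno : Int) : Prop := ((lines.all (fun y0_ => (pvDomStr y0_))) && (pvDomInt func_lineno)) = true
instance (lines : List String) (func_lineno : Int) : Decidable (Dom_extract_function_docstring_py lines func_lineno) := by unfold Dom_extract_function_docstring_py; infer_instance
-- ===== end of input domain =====

-- B replaces A's single collecting backward loop by a boundary-finding backward scan plus a forward
-- extraction pass (different decomposition, same cost); A = B proved on all inputs where A returns.


-- lines[i].strip() — computed identically by both Pythons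
def pvLine (lines : List String) (i : Nat) : String :=
  PySem.Str.strip (lines.getD i "")

-- line[2:].strip() of the stripped line — the extracted doc text of line i
def pvDoc (lines : List String) (i : Nat) : String :=
  PySem.Str.strip (PySem.Str.slice (pvLine lines i) (some 2) none)

-- ===== PORT A =====
-- A's backward loop: i runs func_lineno-1, …, 0; comments are prepended (insert(0)),
-- blank lines are skipped, the first non-blank non-comment line breaks.
def aLoop (lines : List String) : Nat → List String → List String
  | i, acc =>
    if PySem.Str.startswith (pvLine lines i) "--" = true then
      if i = 0 then pvDoc lines i :: acc
      else aLoop lines (i - 1) (pvDoc lines i :: acc)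
    else if pvLine lines i ≠ "" then acc
    else if i = 0 then acc
    else aLoop lines (i - 1) acc
  termination_by i => i
  decreasing_by all_goals omega

def extract_function_docstring_py (lines : List String) (func_lineno : Int) : String :=
  PySem.Str.join "\n"
    (if 1 ≤ func_lineno then aLoop lines (func_lineno - 1).toNat [] else [])

-- ===== PORT B =====
-- B's while loop: decrement i from func_lineno-1 while the stripped line is blank or a comment;
-- stop (break) at the first non-blank non-comment line, or at -1 past the top of the file.
def bBoundary (lines : List String) : Nat → Int
  | i =>
    if pvLine lines i ≠ "" ∧ PySem.Str.startswith (pvLine lines i) "--" = false then (i : Int)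
    else if i = 0 then -1
    else bBoundary lines (i - 1)
  termination_by i => i
  decreasing_by omega

-- B's forward pass: for j in range(lo, hi): collect line[2:].strip() of each comment line.
def bCollect (lines : List String) (lo hi : Int) : List String :=
  (PySem.List.pyRange lo hi 1).filterMap (fun j =>
    if PySem.Str.startswith (pvLine lines j.toNat) "--" = true then some (pvDoc lines j.toNat)
    else none)

def extract_function_docstring_py_alt (lines : List String) (func_lineno : Int) : String :=
  PySem.Str.join "\n"
    (bCollect lines
      ((if 1 ≤ func_lineno then bBoundary lines (func_lineno - 1).toNat else func_lineno - 1) + 1)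
      func_lineno)

-- ===== PRECONDITION & SPEC =====
-- Pre_ excludes exactly the inputs where Python A raises IndexError: func_lineno - 1 beyond the
-- end of lines (A indexes lines[func_lineno - 1] first whenever func_lineno ≥ 1).
def Pre_extract_function_docstring_py (lines : List String) (func_lineno : Int) : Prop :=
  func_lineno ≤ lines.length
instance (lines : List String) (func_lineno : Int) : Decidable (Pre_extract_function_docstring_py lines func_lineno) := by unfold Pre_extract_function_docstring_py; infer_instance

def pvWitness_extract_function_docstring_py : List String × Int :=
  (["-- doc line", "", "-- more", "function f()"], 3)

def Spec_extract_function_docstring_py (lines : List String) (func_lineno : Int) (out : String) : Prop := out = extract_function_docstring_py_alt lines func_lineno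
instance (lines : List String) (func_lineno : Int) (out : String) : Decidable (Spec_extract_function_docstring_py lines func_lineno out) := by unfold Spec_extract_function_docstring_py; infer_instance

-- ===== CLAIM (what is proved, stated in full; the proofs are below) =====
def Claim_equal_extract_function_docstring_py : Prop := ∀ (lines : List String) (func_lineno : Int), Dom_extract_function_docstring_py lines func_lineno → Pre_extract_function_docstring_py lines func_lineno → Spec_extract_function_docstring_py lines func_lineno (extract_function_docstring_py lines func_lineno)

-- ===== LEMMAS AND PROOFS =====

-- while-loop boundary never exceeds its starting index
theorem bBoundary_le (lines : List String) (i : Nat) : bBoundary lines i ≤ (i : Int) := by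
  induction i with
  | zero =>
    rw [bBoundary]
    split
    · simp
    · simp
  | succ n ih =>
    rw [bBoundary]
    split
    · simp
    · rw [if_neg (show ¬ (n + 1 = 0) from by omega)]
      simp only [Nat.add_sub_cancel]
      exact le_trans ih (by push_cast; omega)

-- peeling the last index off B's forward pass
set_option maxHeartbeats 1000000 in
theorem bCollect_succ (lines : List String) (lo : Int) (i : Nat) (h : lo ≤ (i : Int)) :
    bCollect lines lo ((i : Int) + 1) =
      bCollect lines lo i ++
        (if PySem.Str.startswith (pvLine lines i) "--" = true then [pvDoc lines i] else []) := by
  unfold bCollect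
  rw [PySem.List.pyRange_one_succ_right h, List.filterMap_append]
  congr 1
  simp only [List.filterMap_cons, List.filterMap_nil, Int.toNat_natCast]
  by_cases hc : PySem.Str.startswith (pvLine lines i) "--" = true
  · rw [if_pos hc, if_pos hc]
  · rw [if_neg hc, if_neg hc]

theorem bCollect_nil (lines : List String) (lo hi : Int) (h : hi ≤ lo) :
    bCollect lines lo hi = [] := by
  unfold bCollect
  rw [PySem.List.pyRange_one_eq_nil h]
  rfl

-- A's backward collecting loop = B's boundary scan followed by B's forward pass
set_option maxHeartbeats 2000000 in
theorem aLoop_eq (lines : List String) (i : Nat) (acc : List String) :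
    aLoop lines i acc = bCollect lines (bBoundary lines i + 1) ((i : Int) + 1) ++ acc := by
  induction i generalizing acc with
  | zero =>
    rw [aLoop, bBoundary]
    by_cases hc : PySem.Str.startswith (pvLine lines 0) "--" = true
    · have hne : ¬ (pvLine lines 0 ≠ "" ∧ PySem.Str.startswith (pvLine lines 0) "--" = false) := by
        rintro ⟨-, h2⟩; rw [hc] at h2; exact Bool.noConfusion h2
      rw [if_pos hc, if_pos rfl, if_neg hne, if_pos rfl,
        show (-1 : Int) + 1 = ((0 : Nat) : Int) from by norm_num,
        bCollect_succ lines _ 0 (le_refl _), bCollect_nil lines _ _ (le_refl _), if_pos hc,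
        List.nil_append, List.singleton_append]
    · by_cases hb : pvLine lines 0 = ""
      · have hne : ¬ (pvLine lines 0 ≠ "" ∧ PySem.Str.startswith (pvLine lines 0) "--" = false) := by
          rintro ⟨h1, -⟩; exact h1 hb
        rw [if_neg hc, if_neg (show ¬ (pvLine lines 0 ≠ "") from fun h1 => h1 hb), if_pos rfl,
          if_neg hne, if_pos rfl,
          show (-1 : Int) + 1 = ((0 : Nat) : Int) from by norm_num,
          bCollect_succ lines _ 0 (le_refl _), bCollect_nil lines _ _ (le_refl _), if_neg hc]
        simp only [List.nil_append, List.append_nil]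
      · have hcf : PySem.Str.startswith (pvLine lines 0) "--" = false := by
          cases hE : PySem.Str.startswith (pvLine lines 0) "--"
          · rfl
          · exact absurd hE hc
        rw [if_neg hc, if_pos hb, if_pos ⟨hb, hcf⟩,
          bCollect_nil lines _ _ (by push_cast)]
        simp only [List.nil_append]
  | succ n ih =>
    rw [aLoop, bBoundary]
    have hne1 : ¬ (n + 1 = 0) := by omega
    have hle : bBoundary lines n + 1 ≤ ((n + 1 : Nat) : Int) := by
      have := bBoundary_le lines n; push_cast at *; omega
    by_cases hc : PySem.Str.startswith (pvLine lines (n + 1)) "--" = true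
    · have hne : ¬ (pvLine lines (n + 1) ≠ "" ∧
          PySem.Str.startswith (pvLine lines (n + 1)) "--" = false) := by
        rintro ⟨-, h2⟩; rw [hc] at h2; exact Bool.noConfusion h2
      rw [if_pos hc, if_neg hne1, if_neg hne, if_neg hne1]
      simp only [Nat.add_sub_cancel]
      rw [ih, bCollect_succ lines _ (n + 1) hle, if_pos hc, List.append_assoc,
        List.singleton_append]
      norm_cast
    · by_cases hb : pvLine lines (n + 1) = ""
      · have hne : ¬ (pvLine lines (n + 1) ≠ "" ∧
            PySem.Str.startswith (pvLine lines (n + 1)) "--" = false) := by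
          rintro ⟨h1, -⟩; exact h1 hb
        rw [if_neg hc, if_neg (show ¬ (pvLine lines (n + 1) ≠ "") from fun h1 => h1 hb),
          if_neg hne1, if_neg hne, if_neg hne1]
        simp only [Nat.add_sub_cancel]
        rw [ih, bCollect_succ lines _ (n + 1) hle, if_neg hc, List.append_nil]
        norm_cast
      · have hcf : PySem.Str.startswith (pvLine lines (n + 1)) "--" = false := by
          cases hE : PySem.Str.startswith (pvLine lines (n + 1)) "--"
          · rfl
          · exact absurd hE hc
        rw [if_neg hc, if_pos hb, if_pos ⟨hb, hcf⟩,
          bCollect_nil lines _ _ (by push_cast; omega), List.nil_append]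

-- ===== VERDICT (by name: the statement is the Claim_ definition above) =====
theorem extract_function_docstring_py_spec : Claim_equal_extract_function_docstring_py := by
  intro lines func_lineno _hdom _hpre
  unfold Spec_extract_function_docstring_py
  unfold extract_function_docstring_py extract_function_docstring_py_alt
  by_cases h : 1 ≤ func_lineno
  · rw [if_pos h, if_pos h, aLoop_eq,
      show ((func_lineno - 1).toNat : Int) + 1 = func_lineno from by omega,
      List.append_nil]
  · rw [if_neg h, if_neg h, bCollect_nil lines _ _ (by omega)]
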